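-- pv_equiv track=rewrite | github.com/913-Ifrim-Cristian/ubb | Semester 1/Fundamentals of Programming/Test 1/src/functions.py | checkExist
-- ===== SOURCE A (Python) =====
-- def toList(number):
--     """
--     Converts a number to a list
--     :param number:
--     :return:
--     """
--     lst = []
--     while(number > 0):
--         lst.append(number % 10)
--         number //= 10
--     return lst
--
-- def checkExist(option, randomNo):
--     """
--     This function checks if there are existing digits from the input option into the generated number
--     :return:
--     """
--     lst = toList(randomNo)
--     while(option > 0):
--         c = option % 10
--         if c in lst:
--             return True
--         option //= 10
--
--     return False
-- ===== SOURCE B (Python) =====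
-- def checkExist(option, randomNo):
--     def has_digit(n, d):
--         while n > 0:
--             if n % 10 == d:
--                 return True
--             n //= 10
--         return False
--     return any(has_digit(option, d) and has_digit(randomNo, d) for d in range(10))
-- ===== Notes on version B (the rewrite author's own statement) =====
-- stated objective: alternative
-- what changed: B inverts the traversal: instead of scanning option's digits against a materialised digit list of randomNo, it enumerates the ten possible digit values 0-9 and tests each for membership in both numbers with an arithmetic has_digit predicate, building no container at all.
import Mathlib
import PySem

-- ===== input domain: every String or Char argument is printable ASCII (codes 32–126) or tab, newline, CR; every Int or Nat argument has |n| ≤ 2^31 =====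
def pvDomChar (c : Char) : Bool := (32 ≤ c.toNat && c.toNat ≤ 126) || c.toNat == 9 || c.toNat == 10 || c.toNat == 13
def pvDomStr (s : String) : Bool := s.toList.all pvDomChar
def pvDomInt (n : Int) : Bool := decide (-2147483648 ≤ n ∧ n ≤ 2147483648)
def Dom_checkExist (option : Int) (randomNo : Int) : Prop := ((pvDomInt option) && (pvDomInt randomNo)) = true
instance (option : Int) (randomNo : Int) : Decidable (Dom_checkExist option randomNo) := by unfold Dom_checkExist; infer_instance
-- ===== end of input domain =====

-- B enumerates the ten digit values 0-9 and tests each against both numbers arithmetically, instead of A's scan of option's digits against a digit list of randomNo (objective: alternative).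

-- ===== PORT A =====
-- while(number > 0): lst.append(number % 10); number //= 10
def pvToList (number : Int) : List Int :=
  if number > 0 then
    PySem.Int.mod number 10 :: pvToList (PySem.Int.floordiv number 10)
  else []
termination_by number.toNat
decreasing_by
  rw [PySem.Int.floordiv_eq_ediv_of_pos (by omega)]
  omega

def pvScan (option : Int) (lst : List Int) : Bool :=
  if option > 0 then
    if lst.contains (PySem.Int.mod option 10) then true
    else pvScan (PySem.Int.floordiv option 10) lst
  else false
termination_by option.toNat
decreasing_by
  rw [PySem.Int.floordiv_eq_ediv_of_pos (by omega)]
  omega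

def checkExist (option : Int) (randomNo : Int) : Bool :=
  pvScan option (pvToList randomNo)

-- ===== PORT B =====
-- has_digit(n, d): while n > 0: if n % 10 == d: return True; n //= 10; return False
def pvHasDigit (n : Int) (d : Int) : Bool :=
  if n > 0 then
    if PySem.Int.mod n 10 == d then true
    else pvHasDigit (PySem.Int.floordiv n 10) d
  else false
termination_by n.toNat
decreasing_by
  rw [PySem.Int.floordiv_eq_ediv_of_pos (by omega)]
  omega

-- any(has_digit(option, d) and has_digit(randomNo, d) for d in range(10))
def checkExist_alt (option : Int) (randomNo : Int) : Bool :=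
  (PySem.List.pyRange 0 10 1).any (fun d => pvHasDigit option d && pvHasDigit randomNo d)

-- ===== PRECONDITION & SPEC =====
def Spec_checkExist (option : Int) (randomNo : Int) (out : Bool) : Prop := out = checkExist_alt option randomNo
instance (option : Int) (randomNo : Int) (out : Bool) : Decidable (Spec_checkExist option randomNo out) := by unfold Spec_checkExist; infer_instance

-- ===== CLAIM =====
def Claim_equal_checkExist : Prop := ∀ (option : Int) (randomNo : Int), Dom_checkExist option randomNo → Spec_checkExist option randomNo (checkExist option randomNo)

-- ===== LEMMAS AND PROOFS =====

theorem pvHasDigit_iff (n d : Int) : pvHasDigit n d = true ↔ d ∈ pvToList n := by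
  fun_induction pvHasDigit n d with
  | case1 n h hc =>
    rw [pvToList]
    simp only [beq_iff_eq] at hc
    simp [h, hc.symm]
  | case2 n h hc ih =>
    rw [pvToList]
    simp only [beq_iff_eq] at hc
    rw [if_pos h, ih, List.mem_cons]
    constructor
    · exact Or.inr
    · rintro (rfl | h') <;> [exact absurd rfl (fun e => hc e.symm); exact h']
  | case3 n h =>
    rw [pvToList, if_neg h]
    simp

theorem pvScan_iff (o : Int) (lst : List Int) :
    pvScan o lst = true ↔ ∃ x ∈ pvToList o, x ∈ lst := by
  fun_induction pvScan o lst with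
  | case1 o h hc =>
    conv_rhs => rw [pvToList, if_pos h]
    simp only [List.contains_iff_mem] at hc
    constructor
    · intro _; exact ⟨PySem.Int.mod o 10, List.mem_cons_self, hc⟩
    · intro _; rfl
  | case2 o h hc ih =>
    conv_rhs => rw [pvToList, if_pos h]
    simp only [List.contains_iff_mem] at hc
    rw [ih]
    constructor
    · rintro ⟨x, hx, hl⟩; exact ⟨x, List.mem_cons_of_mem _ hx, hl⟩
    · rintro ⟨x, hx, hl⟩
      rcases List.mem_cons.1 hx with rfl | hx'
      · exact absurd hl hc
      · exact ⟨x, hx', hl⟩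
  | case3 o h =>
    rw [pvToList, if_neg h]
    simp

theorem mem_pvToList_bounds (n x : Int) (hx : x ∈ pvToList n) : 0 ≤ x ∧ x < 10 := by
  fun_induction pvToList n with
  | case1 n h ih =>
    rcases List.mem_cons.1 hx with rfl | h'
    · rw [PySem.Int.mod_eq_emod_of_pos (by omega)]
      omega
    · exact ih h'
  | case2 n h => simp at hx

-- ===== VERDICT =====
theorem checkExist_spec : Claim_equal_checkExist := by
  intro o r _
  unfold Spec_checkExist checkExist checkExist_alt
  rw [Bool.eq_iff_iff, pvScan_iff, List.any_eq_true]
  constructor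
  · rintro ⟨x, hx, hl⟩
    refine ⟨x, ?_, ?_⟩
    · obtain ⟨h0, h10⟩ := mem_pvToList_bounds o x hx
      interval_cases x <;> decide
    · simp only [Bool.and_eq_true, pvHasDigit_iff]
      exact ⟨hx, hl⟩
  · rintro ⟨d, _, hd⟩
    simp only [Bool.and_eq_true, pvHasDigit_iff] at hd
    exact ⟨d, hd.1, hd.2⟩
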